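-- pv_equiv track=rewrite | github.com/Mizerael/p-adic_ssu | src/task2/bee_tran_poly.py | check_cycling
-- ===== SOURCE A (Python) =====
-- from typing import List, Tuple
--
-- def calc_poly(poly_coefs: List[int], x: int, mod: int) -> int:
--     res = 0
--     for i in range(len(poly_coefs)):
--         res += poly_coefs[i] * x**i
--     return res % mod
--
-- def check_cycling(poly_cf: List[int], md: int) -> Tuple[bool, List[List[int]]]:
--     gr = [x for x in range(md)]
--     cycles = []
--     while len(gr) > 0:
--         new_cycle = [gr[0]]
--         gr.remove(gr[0])
--         next_el = calc_poly(poly_cf, new_cycle[-1], md)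
--         while next_el in gr:
--             new_cycle.append(next_el)
--             gr.remove(next_el)
--             next_el = calc_poly(poly_cf, new_cycle[-1], md)
--         if next_el != new_cycle[0]:
--             cycles.append(new_cycle)
--             return False, cycles
--         cycles.append(new_cycle)
--     return True, cycles
-- ===== SOURCE B (Python) =====
-- from typing import List, Tuple
--
-- def check_cycling(poly_cf: List[int], md: int) -> Tuple[bool, List[List[int]]]:
--     # Precompute f(x) mod md for every x via Horner with intermediate reduction,
--     # then walk the functional graph with a visited array (no list scans/removes).
--     f = []
--     for x in range(md):
--         r = 0
--         for c in reversed(poly_cf):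
--             r = (r * x + c) % md
--         f.append(r)
--     visited = [False] * md
--     cycles = []
--     for start in range(md):
--         if visited[start]:
--             continue
--         path = [start]
--         visited[start] = True
--         nxt = f[start]
--         while not visited[nxt]:
--             path.append(nxt)
--             visited[nxt] = True
--             nxt = f[nxt]
--         cycles.append(path)
--         if nxt != start:
--             return False, cycles
--     return True, cycles
-- ===== Notes on version B (the rewrite author's own statement) =====
-- stated objective: faster
-- what changed: B precomputes f(x) for every residue once via Horner with intermediate reduction and walks the functional graph with a visited array, instead of A's per-step power-sum evaluation plus O(md) list membership tests and list.remove scans.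
import Mathlib
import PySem

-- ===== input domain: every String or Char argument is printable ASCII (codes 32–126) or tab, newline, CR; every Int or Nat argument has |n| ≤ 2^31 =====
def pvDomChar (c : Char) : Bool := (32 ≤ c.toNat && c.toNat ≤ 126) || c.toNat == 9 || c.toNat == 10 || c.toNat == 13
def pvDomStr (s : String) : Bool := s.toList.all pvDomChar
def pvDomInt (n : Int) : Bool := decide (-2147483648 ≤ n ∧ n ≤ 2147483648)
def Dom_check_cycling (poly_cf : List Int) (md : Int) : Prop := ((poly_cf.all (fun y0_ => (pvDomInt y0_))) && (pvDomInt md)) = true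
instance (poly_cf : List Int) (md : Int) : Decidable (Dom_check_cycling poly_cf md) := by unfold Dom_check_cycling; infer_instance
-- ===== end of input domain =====

-- B replaces A's repeated list scans/removes and per-step power sums by a precomputed
-- Horner value table and a visited-array walk of the functional graph.

-- ===== PORT A =====
-- calc_poly: res = sum(poly_coefs[i] * x**i); return res % mod
def calc_polyA (poly_coefs : List Int) (x md : Int) : Int :=
  PySem.Int.mod
    ((PySem.List.pyRange 0 poly_coefs.length 1).foldl
      (fun res i => res + PySem.List.pyGetD poly_coefs i 0 * x ^ i.toNat) 0)
    md

-- inner while loop: while next_el in gr: append, remove, recompute from new_cycle[-1]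
def innerA (poly_cf : List Int) (md : Int) (cycle gr : List Int) (next_el : Int) :
    List Int × List Int × Int :=
  if h : next_el ∈ gr then
    innerA poly_cf md (cycle ++ [next_el]) (gr.erase next_el) (calc_polyA poly_cf next_el md)
  else (cycle, gr, next_el)
termination_by gr.length
decreasing_by
  have h1 := List.length_erase_of_mem h; have h2 := List.length_pos_of_mem h; omega

theorem innerA_gr_len_le (poly_cf : List Int) (md : Int) :
    ∀ (cycle gr : List Int) (next_el : Int),
      (innerA poly_cf md cycle gr next_el).2.1.length ≤ gr.length := by
  intro cycle gr next_el
  fun_induction innerA poly_cf md cycle gr next_el with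
  | case1 cyc g nxt h ih =>
    have h1 := List.length_erase_of_mem h
    have h2 := List.length_pos_of_mem h
    omega
  | case2 cyc g nxt h => simp

-- outer while loop over gr; gr.remove(gr[0]) drops the head (the first occurrence of gr[0])
def outerA (poly_cf : List Int) (md : Int) (gr : List Int) (cycles : List (List Int)) :
    Bool × List (List Int) :=
  match gr with
  | [] => (true, cycles)
  | g0 :: rest =>
    let r := innerA poly_cf md [g0] rest (calc_polyA poly_cf g0 md)
    if r.2.2 ≠ g0 then (false, cycles ++ [r.1])
    else outerA poly_cf md r.2.1 (cycles ++ [r.1])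
termination_by gr.length
decreasing_by
  have := innerA_gr_len_le poly_cf md [g0] rest (calc_polyA poly_cf g0 md)
  simp only [List.length_cons]; omega

def check_cycling (poly_cf : List Int) (md : Int) : Bool × List (List Int) :=
  outerA poly_cf md (PySem.List.pyRange 0 md 1) []

-- ===== PORT B =====
-- Horner evaluation with intermediate reduction: r = (r*x + c) % md over reversed coefficients
def hornerB (poly_cf : List Int) (x md : Int) : Int :=
  poly_cf.reverse.foldl (fun r c => PySem.Int.mod (r * x + c) md) 0

-- f = [horner(x) for x in range(md)]
def tableB (poly_cf : List Int) (md : Int) : List Int :=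
  (PySem.List.pyRange 0 md 1).map (fun x => hornerB poly_cf x md)

-- termination measure helper for innerB (cited by its decreasing_by)
theorem count_false_set_true_lt (v : List Bool) (i : Nat) (hi : i < v.length)
    (hv : v.getD i false = false) : (v.set i true).count false < v.count false := by
  induction v generalizing i with
  | nil => simp at hi
  | cons a t ih =>
    cases i with
    | zero =>
      simp [List.getD] at hv
      subst hv
      simp
    | succ j =>
      simp only [List.length_cons] at hi
      simp only [List.getD, List.getElem?_cons_succ] at hv
      have := ih j (by omega) (by simpa [List.getD] using hv)
      by_cases ha : a = false <;> simp [ha] <;> omega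

-- while not visited[nxt]: append, mark, nxt = f[nxt].
-- On every state B's Python reaches, 0 ≤ nxt < md = visited.length; the two bound
-- conjuncts in the guard only make the recursion total and never fail on those states.
def innerB (f : List Int) (path : List Int) (visited : List Bool) (nxt : Int) :
    List Int × List Bool × Int :=
  if h : 0 ≤ nxt ∧ nxt.toNat < visited.length ∧ PySem.List.pyGetD visited nxt false = false then
    innerB f (path ++ [nxt]) (PySem.List.pySetD visited nxt true) (PySem.List.pyGetD f nxt 0)
  else (path, visited, nxt)
termination_by visited.count false
decreasing_by
  obtain ⟨h0, h1, h2⟩ := h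
  rw [PySem.List.pySetD_of_nonneg visited true h0]
  rw [PySem.List.pyGetD_of_nonneg visited false h0] at h2
  exact count_false_set_true_lt visited nxt.toNat h1 h2

-- for start in range(md): skip visited starts, else walk one path from start
def outerB (f : List Int) (starts : List Int) (visited : List Bool) (cycles : List (List Int)) :
    Bool × List (List Int) :=
  match starts with
  | [] => (true, cycles)
  | s :: rest =>
    if PySem.List.pyGetD visited s false then outerB f rest visited cycles
    else
      let r := innerB f [s] (PySem.List.pySetD visited s true) (PySem.List.pyGetD f s 0)
      if r.2.2 ≠ s then (false, cycles ++ [r.1])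
      else outerB f rest r.2.1 (cycles ++ [r.1])

def check_cycling_alt (poly_cf : List Int) (md : Int) : Bool × List (List Int) :=
  outerB (tableB poly_cf md) (PySem.List.pyRange 0 md 1) (List.replicate md.toNat false) []

-- ===== PRECONDITION & SPEC =====
def Spec_check_cycling (poly_cf : List Int) (md : Int) (out : Bool × List (List Int)) : Prop := out = check_cycling_alt poly_cf md
instance (poly_cf : List Int) (md : Int) (out : Bool × List (List Int)) : Decidable (Spec_check_cycling poly_cf md out) := by unfold Spec_check_cycling; infer_instance

-- ===== CLAIM (what is proved, stated in full; the proofs are below) =====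
def Claim_equal_check_cycling : Prop := ∀ (poly_cf : List Int) (md : Int), Dom_check_cycling poly_cf md → Spec_check_cycling poly_cf md (check_cycling poly_cf md)

-- ===== LEMMAS AND PROOFS =====

-- the set of not-yet-visited vertices, in increasing order (A's `gr`)
def grOf (md : Int) (v : List Bool) : List Int :=
  (PySem.List.pyRange 0 md 1).filter (fun x => !PySem.List.pyGetD v x false)

-- plain polynomial value sum(c i * x^i)
def pv (c : List Int) (x : Int) : Int := c.foldr (fun a acc => a + acc * x) 0

theorem sum_range_getD (c : List Int) (x : Int) :
    ((List.range c.length).map (fun k => c.getD k 0 * x ^ k)).sum = pv c x := by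
  induction c with
  | nil => simp [pv]
  | cons a t ih =>
    rw [List.length_cons, List.range_succ_eq_map]
    simp only [List.map_cons, List.map_map, List.sum_cons]
    have : ((List.range t.length).map ((fun k => (a :: t).getD k 0 * x ^ k) ∘ Nat.succ)).sum
        = ((List.range t.length).map (fun k => t.getD k 0 * x ^ k * x)).sum := by
      congr 1; apply List.map_congr_left; intro k _
      simp [List.getD, pow_succ]; ring
    rw [this, List.sum_map_mul_right, ih]
    simp [pv, List.getD]

theorem calc_polyA_eq (c : List Int) (x md : Int) :
    calc_polyA c x md = PySem.Int.mod (pv c x) md := by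
  unfold calc_polyA
  rw [PySem.List.foldl_add]
  congr 1
  rw [zero_add, PySem.List.pyRange_zero_nat c.length, List.map_map]
  have hm : (List.map ((fun i : Int => PySem.List.pyGetD c i 0 * x ^ i.toNat) ∘ fun k : Nat => (k : Int)) (List.range c.length))
      = (List.range c.length).map (fun k => c.getD k 0 * x ^ k) := by
    apply List.map_congr_left; intro k _
    simp [PySem.List.pyGetD_natCast]
  rw [hm, sum_range_getD]

theorem hornerB_eq (c : List Int) (x md : Int) (hmd : 0 < md) :
    hornerB c x md = PySem.Int.mod (pv c x) md := by
  unfold hornerB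
  rw [List.foldl_reverse]
  induction c with
  | nil => simp [pv, PySem.Int.mod_eq_emod_of_pos hmd]
  | cons a t ih =>
    simp only [List.foldr_cons, ih]
    simp only [PySem.Int.mod_eq_emod_of_pos hmd]
    have hp : pv (a :: t) x = pv t x * x + a := by simp [pv]; ring
    rw [hp]
    conv_rhs => rw [Int.add_emod, Int.mul_emod]
    conv_lhs => rw [Int.add_emod, Int.mul_emod, Int.emod_emod_of_dvd _ dvd_rfl]

theorem calc_bounds (c : List Int) (x md : Int) (hmd : 0 < md) :
    0 ≤ calc_polyA c x md ∧ calc_polyA c x md < md := by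
  unfold calc_polyA
  exact ⟨PySem.Int.mod_nonneg _ hmd, PySem.Int.mod_lt _ hmd⟩

theorem tableB_getD (c : List Int) (md t : Int) (hmd : 0 < md) (h0 : 0 ≤ t) (h1 : t < md) :
    PySem.List.pyGetD (tableB c md) t 0 = calc_polyA c t md := by
  unfold tableB
  rw [PySem.List.pyGetD_map_pyRange_of_nonneg _ _ _ _ h0 h1, hornerB_eq c t md hmd,
    calc_polyA_eq]

theorem mem_grOf (md : Int) (v : List Bool) (x : Int) :
    x ∈ grOf md v ↔ (0 ≤ x ∧ x < md) ∧ PySem.List.pyGetD v x false = false := by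
  simp [grOf, PySem.List.mem_pyRange_one, and_assoc]

theorem grOf_set (md t : Int) (v : List Bool) (h0 : 0 ≤ t) (h1 : t < md)
    (hlen : v.length = md.toNat) :
    grOf md (v.set t.toNat true) = (grOf md v).erase t := by
  have hnd : (grOf md v).Nodup := (PySem.List.nodup_pyRange_one 0 md).filter _
  rw [hnd.erase_eq_filter, grOf, grOf, List.filter_filter]
  apply List.filter_congr
  intro x hx
  have hxb := (PySem.List.mem_pyRange_one).mp hx
  rw [PySem.List.pyGetD_of_nonneg _ false hxb.1, PySem.List.pyGetD_of_nonneg _ false hxb.1]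
  by_cases hxt : x = t
  · have hlt : t.toNat < v.length := by omega
    simp [List.getD, hxt, hlt]
  · have hne : x.toNat ≠ t.toNat := by omega
    simp [List.getD, List.getElem?_set_ne (Ne.symm hne), hxt]

theorem innerB_visited (f : List Int) :
    ∀ (path : List Int) (v : List Bool) (nxt : Int),
      (innerB f path v nxt).2.1.length = v.length ∧
      ∀ j : Nat, v.getD j false = true → (innerB f path v nxt).2.1.getD j false = true := by
  intro path v nxt
  fun_induction innerB f path v nxt with
  | case1 p v' nxt' h ih =>
    obtain ⟨h0, h1, h2⟩ := h
    have hset : PySem.List.pySetD v' nxt' true = v'.set nxt'.toNat true :=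
      PySem.List.pySetD_of_nonneg v' true h0
    simp only [hset, List.length_set] at ih ⊢
    refine ⟨ih.1, fun j hj => ?_⟩
    apply ih.2
    by_cases hji : j = nxt'.toNat
    · subst hji
      simp [List.getD, h1]
    · rw [PySem.List.pyGetD_of_nonneg v' false h0] at h2
      simpa [List.getD, List.getElem?_set_ne (Ne.symm hji)] using hj
  | case2 p v' nxt' h => exact ⟨rfl, fun j hj => hj⟩

theorem inner_eq (c : List Int) (md : Int) (hmd : 0 < md) :
    ∀ (n : Nat) (v : List Bool) (cyc : List Int) (nxt : Int),
      v.count false ≤ n → v.length = md.toNat → 0 ≤ nxt → nxt < md →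
      innerA c md cyc (grOf md v) nxt =
        ((innerB (tableB c md) cyc v nxt).1,
         grOf md (innerB (tableB c md) cyc v nxt).2.1,
         (innerB (tableB c md) cyc v nxt).2.2) := by
  intro n
  induction n with
  | zero =>
    intro v cyc nxt hcnt hlen h0 h1
    have hg : nxt.toNat < v.length := by omega
    have hvn : PySem.List.pyGetD v nxt false = true := by
      by_contra hc
      rw [Bool.not_eq_true] at hc
      rw [PySem.List.pyGetD_of_nonneg v false h0] at hc
      have hmem : false ∈ v := by
        have : v.getD nxt.toNat false = v[nxt.toNat] := List.getD_eq_getElem v false hg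
        rw [this] at hc
        exact hc ▸ List.getElem_mem hg
      have := List.count_pos_iff.mpr hmem
      omega
    have hA : nxt ∉ grOf md v := by
      rw [mem_grOf]; intro hmem; rw [hvn] at hmem; simp at hmem
    rw [innerA.eq_def, dif_neg hA, innerB.eq_def,
      dif_neg (by intro hc; rw [hvn] at hc; simp at hc)]
  | succ n ih =>
    intro v cyc nxt hcnt hlen h0 h1
    have hg : nxt.toNat < v.length := by omega
    by_cases hvn : PySem.List.pyGetD v nxt false = false
    · have hA : nxt ∈ grOf md v := by rw [mem_grOf]; exact ⟨⟨h0, h1⟩, hvn⟩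
      rw [innerA.eq_def, dif_pos hA, innerB.eq_def, dif_pos ⟨h0, hg, hvn⟩]
      have hset : PySem.List.pySetD v nxt true = v.set nxt.toNat true :=
        PySem.List.pySetD_of_nonneg v true h0
      have herase : (grOf md v).erase nxt = grOf md (v.set nxt.toNat true) :=
        (grOf_set md nxt v h0 h1 hlen).symm
      have htbl : PySem.List.pyGetD (tableB c md) nxt 0 = calc_polyA c nxt md :=
        tableB_getD c md nxt hmd h0 h1
      rw [herase, hset, htbl]
      have hcnt' : (v.set nxt.toNat true).count false ≤ n := by
        have hgd : v.getD nxt.toNat false = false := by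
          rw [PySem.List.pyGetD_of_nonneg v false h0] at hvn; exact hvn
        have := count_false_set_true_lt v nxt.toNat hg hgd
        omega
      exact ih (v.set nxt.toNat true) (cyc ++ [nxt]) (calc_polyA c nxt md) hcnt'
        (by simp [hlen]) (calc_bounds c nxt md hmd).1 (calc_bounds c nxt md hmd).2
    · rw [Bool.not_eq_false] at hvn
      have hA : nxt ∉ grOf md v := by
        rw [mem_grOf]; intro hmem; rw [hvn] at hmem; simp at hmem
      rw [innerA.eq_def, dif_neg hA, innerB.eq_def,
        dif_neg (by intro hc; rw [hvn] at hc; simp at hc)]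

theorem outerA_nil (c : List Int) (md : Int) (cycles : List (List Int)) :
    outerA c md [] cycles = (true, cycles) := by
  rw [outerA]

theorem outerA_cons (c : List Int) (md g0 : Int) (rest : List Int) (cycles : List (List Int)) :
    outerA c md (g0 :: rest) cycles =
      (if (innerA c md [g0] rest (calc_polyA c g0 md)).2.2 ≠ g0 then
        (false, cycles ++ [(innerA c md [g0] rest (calc_polyA c g0 md)).1])
      else outerA c md (innerA c md [g0] rest (calc_polyA c g0 md)).2.1
        (cycles ++ [(innerA c md [g0] rest (calc_polyA c g0 md)).1])) := by
  rw [outerA]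

theorem grOf_nil_of_ge (md k : Int) (v : List Bool) (hk : md ≤ k)
    (hvis : ∀ x : Int, 0 ≤ x → x < k → PySem.List.pyGetD v x false = true) :
    grOf md v = [] := by
  rw [List.eq_nil_iff_forall_not_mem]
  intro x hx
  obtain ⟨⟨hx0, hx1⟩, hxf⟩ := (mem_grOf md v x).mp hx
  rw [hvis x hx0 (by omega)] at hxf
  exact absurd hxf (by simp)

theorem outer_eq (c : List Int) (md : Int) (hmd : 0 < md) :
    ∀ (n : Nat) (k : Int) (v : List Bool) (cycles : List (List Int)),
      (md - k).toNat ≤ n → 0 ≤ k → v.length = md.toNat →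
      (∀ x : Int, 0 ≤ x → x < k → PySem.List.pyGetD v x false = true) →
      outerA c md (grOf md v) cycles = outerB (tableB c md) (PySem.List.pyRange k md 1) v cycles := by
  intro n
  induction n with
  | zero =>
    intro k v cycles hn hk0 hlen hvis
    have hk : md ≤ k := by omega
    rw [grOf_nil_of_ge md k v hk hvis, outerA_nil,
      PySem.List.pyRange_one_eq_nil hk, outerB]
  | succ n ih =>
    intro k v cycles hn hk0 hlen hvis
    by_cases hk : md ≤ k
    · rw [grOf_nil_of_ge md k v hk hvis, outerA_nil,
        PySem.List.pyRange_one_eq_nil hk, outerB]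
    · have hlt : k < md := by omega
      rw [PySem.List.pyRange_one_cons hlt, outerB]
      by_cases hvk : PySem.List.pyGetD v k false = true
      · rw [if_pos hvk]
        exact ih (k + 1) v cycles (by omega) (by omega) hlen
          (fun x hx0 hx1 => by
            by_cases hxk : x < k
            · exact hvis x hx0 hxk
            · have : x = k := by omega
              rw [this]; exact hvk)
      · rw [Bool.not_eq_true] at hvk
        rw [if_neg (by simp [hvk])]
        have hktn : k.toNat < v.length := by omega
        have hpre : (PySem.List.pyRange 0 k 1).filter (fun x => !PySem.List.pyGetD v x false) = [] := by
          rw [List.filter_eq_nil_iff]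
          intro x hx
          have hxb := (PySem.List.mem_pyRange_one).mp hx
          rw [hvis x hxb.1 hxb.2]
          simp
        have hgr : grOf md v
            = k :: (PySem.List.pyRange (k+1) md 1).filter (fun x => !PySem.List.pyGetD v x false) := by
          rw [grOf, PySem.List.pyRange_one_append 0 k md hk0 (le_of_lt hlt), List.filter_append,
            hpre, List.nil_append, PySem.List.pyRange_one_cons hlt,
            List.filter_cons_of_pos (by rw [hvk]; simp)]
        have hrest : grOf md (v.set k.toNat true)
            = (PySem.List.pyRange (k+1) md 1).filter (fun x => !PySem.List.pyGetD v x false) := by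
          rw [grOf_set md k v hk0 hlt hlen, hgr, List.erase_cons_head]
        have hset : PySem.List.pySetD v k true = v.set k.toNat true :=
          PySem.List.pySetD_of_nonneg v true hk0
        have htbl : PySem.List.pyGetD (tableB c md) k 0 = calc_polyA c k md :=
          tableB_getD c md k hmd hk0 hlt
        rw [hgr, outerA_cons, ← hrest, hset, htbl]
        have hb := calc_bounds c k md hmd
        rw [inner_eq c md hmd ((v.set k.toNat true).count false) (v.set k.toNat true) [k]
          (calc_polyA c k md) le_rfl (by simp [hlen]) hb.1 hb.2]
        have hiv := innerB_visited (tableB c md) [k] (v.set k.toNat true) (calc_polyA c k md)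
        by_cases hne : (innerB (tableB c md) [k] (v.set k.toNat true) (calc_polyA c k md)).2.2 = k
        · rw [if_neg (by simp [hne]), if_neg (by simp [hne])]
          apply ih (k + 1) _ _ (by omega) (by omega)
          · rw [hiv.1, List.length_set, hlen]
          · intro x hx0 hx1
            rw [PySem.List.pyGetD_of_nonneg _ false hx0]
            apply hiv.2
            by_cases hxk : x = k
            · subst hxk
              simp [List.getD, hktn]
            · have hxkn : x.toNat ≠ k.toNat := by omega
              rw [List.getD, List.getElem?_set_ne (Ne.symm hxkn), ← List.getD]
              rw [← PySem.List.pyGetD_of_nonneg v false hx0]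
              exact hvis x hx0 (by omega)
        · rw [if_pos (by simp [hne]), if_pos (by simp [hne])]

-- ===== VERDICT (by name: the statement is the Claim_ definition above) =====
theorem check_cycling_spec : Claim_equal_check_cycling := by
  intro c md _
  unfold Spec_check_cycling check_cycling check_cycling_alt
  by_cases hmd : 0 < md
  · have hrepl : PySem.List.pyRange 0 md 1 = grOf md (List.replicate md.toNat false) := by
      rw [grOf]
      symm
      apply List.filter_eq_self.mpr
      intro x hx
      have hxb := (PySem.List.mem_pyRange_one).mp hx
      rw [PySem.List.pyGetD_of_nonneg _ false hxb.1]
      simp [List.getD, List.getElem?_replicate]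
      split <;> rfl
    conv_lhs => rw [hrepl]
    exact outer_eq c md hmd (md - 0).toNat 0 (List.replicate md.toNat false) [] le_rfl le_rfl
      (List.length_replicate) (fun x hx0 hx1 => absurd hx1 (by omega))
  · have hnil : PySem.List.pyRange 0 md 1 = [] := PySem.List.pyRange_one_eq_nil (by omega)
    rw [hnil, outerA_nil, outerB]
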